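-- pv_equiv track=rewrite | github.com/dev-mdirfan/Coding-Problem-Solutions | Work@Tech/Python/K-Subarray Sum.py | kSubarraySum1
-- ===== SOURCE A (Python) =====
-- from typing import List
--
-- def kSubarraySum1(A: List[int], k: int) -> List[int]:
--     ans = []
--     n = len(A)
--     for i in range(n-k+1):
--         total = 0
--         for j in range(i, i+k):
--             total += A[j]
--         ans.append(total)
--     return ans
-- ===== SOURCE B (Python) =====
-- from typing import List
--
-- def kSubarraySum1(A: List[int], k: int) -> List[int]:
--     n = len(A)
--     if k > n:
--         return []
--     total = sum(A[:k])
--     ans = [total]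
--     for i in range(k, n):
--         total += A[i] - A[i - k]
--         ans.append(total)
--     return ans
-- ===== Notes on version B (the rewrite author's own statement) =====
-- stated objective: faster
-- what changed: Replaces the O(n*k) re-summation of each window by an O(n) sliding window that keeps a running sum, adding the entering element and subtracting the leaving one.
-- outside the precondition, e.g. on kSubarraySum1([1, 2, 3], -1): A returns [0, 0, 0, 0, 0], B raises IndexError
import Mathlib
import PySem

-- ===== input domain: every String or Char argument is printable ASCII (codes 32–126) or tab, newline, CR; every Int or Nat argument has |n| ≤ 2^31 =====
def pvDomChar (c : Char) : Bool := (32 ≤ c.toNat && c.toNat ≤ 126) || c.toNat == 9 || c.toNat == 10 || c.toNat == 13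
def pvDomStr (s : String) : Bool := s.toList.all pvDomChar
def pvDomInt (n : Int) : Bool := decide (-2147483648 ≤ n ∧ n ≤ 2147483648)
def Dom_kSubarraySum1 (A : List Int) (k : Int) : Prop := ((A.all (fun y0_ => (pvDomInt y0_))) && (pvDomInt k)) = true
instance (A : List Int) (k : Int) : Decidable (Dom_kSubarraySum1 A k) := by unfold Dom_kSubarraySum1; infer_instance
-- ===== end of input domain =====

-- B replaces A's O(n*k) per-window re-summation by an O(n) sliding window (running sum).

-- ===== PORT A =====
def kSubarraySum1 (A : List Int) (k : Int) : List Int :=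
  let n : Int := A.length
  (PySem.List.pyRange 0 (n - k + 1) 1).foldl
    (fun ans i =>
      ans ++ [(PySem.List.pyRange i (i + k) 1).foldl
                (fun total j => total + PySem.List.pyGetD A j 0) 0])
    []

-- ===== PORT B =====
def kSubarraySum1_alt (A : List Int) (k : Int) : List Int :=
  let n : Int := A.length
  if k > n then []
  else
    let total : Int := (PySem.List.slice A none (some k)).foldl (· + ·) 0
    ((PySem.List.pyRange k n 1).foldl
      (fun (st : Int × List Int) i =>
        let t := st.1 + PySem.List.pyGetD A i 0 - PySem.List.pyGetD A (i - k) 0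
        (t, st.2 ++ [t]))
      (total, [total])).2

-- ===== PRECONDITION & SPEC =====
-- Pre_ excludes negative k, on which A's value (a list of n-k+1 zeros, growing as k decreases)
-- is an artefact of range arithmetic and B's sliding window raises IndexError.
def Pre_kSubarraySum1 (_A : List Int) (k : Int) : Prop := 0 ≤ k
instance (A : List Int) (k : Int) : Decidable (Pre_kSubarraySum1 A k) := by unfold Pre_kSubarraySum1; infer_instance
def pvWitness_kSubarraySum1 : List Int × Int := ([1, 2, 3, 4], 2)

def Spec_kSubarraySum1 (A : List Int) (k : Int) (out : List Int) : Prop := out = kSubarraySum1_alt A k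
instance (A : List Int) (k : Int) (out : List Int) : Decidable (Spec_kSubarraySum1 A k out) := by unfold Spec_kSubarraySum1; infer_instance

-- ===== CLAIM (what is proved, stated in full; the proofs are below) =====
def Claim_equal_kSubarraySum1 : Prop := ∀ (A : List Int) (k : Int), Dom_kSubarraySum1 A k → Pre_kSubarraySum1 A k → Spec_kSubarraySum1 A k (kSubarraySum1 A k)

-- ===== LEMMAS AND PROOFS =====

-- the sum of the length-k window of A starting at position i
def pvWin (A : List Int) (k i : Nat) : Int := ((A.drop i).take k).sum

theorem pv_foldl_add (l : List Int) (c : Int) : l.foldl (· + ·) c = c + l.sum := by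
  induction l generalizing c with
  | nil => simp
  | cons x xs ih => simp [List.foldl, ih (c + x)]; ring

theorem pv_take_sum_succ (A : List Int) (m : Nat) (h : m < A.length) :
    (A.take (m + 1)).sum = (A.take m).sum + A.getD m 0 := by
  rw [List.sum_take_succ A m h]
  congr 1
  simp [List.getD, List.getElem?_eq_getElem h]

theorem pv_win_prefix (A : List Int) (k i : Nat) :
    pvWin A k i = (A.take (i + k)).sum - (A.take i).sum := by
  unfold pvWin
  rw [List.take_add]
  simp [List.take_drop]

theorem pv_win_succ (A : List Int) (k j : Nat) (h : j + k < A.length) :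
    pvWin A k (j + 1) = pvWin A k j + A.getD (j + k) 0 - A.getD j 0 := by
  rw [pv_win_prefix, pv_win_prefix]
  have h1 : (A.take (j + k + 1)).sum = (A.take (j + k)).sum + A.getD (j + k) 0 :=
    pv_take_sum_succ A (j + k) h
  have h2 : (A.take (j + 1)).sum = (A.take j).sum + A.getD j 0 :=
    pv_take_sum_succ A j (by omega)
  have : j + 1 + k = j + k + 1 := by omega
  rw [this, h1, h2]
  ring

theorem pv_innerA (A : List Int) (i k : Nat) (h : i + k ≤ A.length) :
    (PySem.List.pyRange (i : Int) ((i : Int) + (k : Int)) 1).foldl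
      (fun total j => total + PySem.List.pyGetD A j 0) 0 = pvWin A k i := by
  induction k with
  | zero => simp [PySem.List.pyRange_one_eq_nil, pvWin]
  | succ k ih =>
    have hk : i + k ≤ A.length := by omega
    have hsplit : PySem.List.pyRange (i : Int) ((i : Int) + ((k : Nat) + 1 : Nat)) 1
        = PySem.List.pyRange (i : Int) ((i : Int) + (k : Int)) 1 ++ [(i : Int) + (k : Int)] := by
      have : ((i : Int) + ((k : Nat) + 1 : Nat)) = ((i : Int) + (k : Int)) + 1 := by push_cast; ring
      rw [this, PySem.List.pyRange_one_succ_right (by omega)]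
    rw [hsplit, List.foldl_append, ih hk]
    have hcast : (i : Int) + (k : Int) = ((i + k : Nat) : Int) := by push_cast; ring
    rw [List.foldl, List.foldl, hcast, PySem.List.pyGetD_natCast]
    -- pvWin A (k+1) i = pvWin A k i + A[i+k]
    unfold pvWin
    rw [List.take_add_one]
    have hlt : k < (A.drop i).length := by simp [List.length_drop]; omega
    simp [List.getD, List.getElem?_eq_getElem hlt, List.getElem_drop]
    simp [List.getElem?_eq_getElem (show i + k < A.length by omega)]

theorem pv_A_closed (A : List Int) (k : Nat) (hk : k ≤ A.length) :
    kSubarraySum1 A (k : Int) = (List.range (A.length - k + 1)).map (pvWin A k) := by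
  unfold kSubarraySum1
  rw [PySem.List.foldl_append_singleton_eq_map]
  rw [PySem.List.pyRange_one]
  have hn : (((A.length : Int)) - (k : Int) + 1 - 0).toNat = A.length - k + 1 := by omega
  rw [hn, List.map_map]
  refine List.map_congr_left ?_
  intro j hj
  rw [List.mem_range] at hj
  have : ((0 : Int) + (j : Int)) = (j : Int) := by ring
  simp only [Function.comp, this]
  exact pv_innerA A j k (by omega)

theorem pv_B_loop (A : List Int) (k : Nat) (d : Nat) (h : k + d ≤ A.length) :
    (PySem.List.pyRange (k : Int) ((k : Int) + (d : Int)) 1).foldl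
      (fun (st : Int × List Int) i =>
        let t := st.1 + PySem.List.pyGetD A i 0 - PySem.List.pyGetD A (i - (k : Int)) 0
        (t, st.2 ++ [t]))
      (pvWin A k 0, [pvWin A k 0])
      = (pvWin A k d, (List.range (d + 1)).map (pvWin A k)) := by
  induction d with
  | zero => simp [PySem.List.pyRange_one_eq_nil, List.range_succ]
  | succ d ih =>
    have hd : k + d ≤ A.length := by omega
    have hsplit : PySem.List.pyRange (k : Int) ((k : Int) + ((d : Nat) + 1 : Nat)) 1
        = PySem.List.pyRange (k : Int) ((k : Int) + (d : Int)) 1 ++ [(k : Int) + (d : Int)] := by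
      have : ((k : Int) + ((d : Nat) + 1 : Nat)) = ((k : Int) + (d : Int)) + 1 := by push_cast [Nat.cast_add]; ring
      rw [this, PySem.List.pyRange_one_succ_right (by omega)]
    rw [hsplit, List.foldl_append, ih hd, List.foldl, List.foldl]
    have e1 : PySem.List.pyGetD A ((k : Int) + (d : Int)) 0 = A.getD (d + k) 0 := by
      have hc : (k : Int) + (d : Int) = ((d + k : Nat) : Int) := by push_cast; ring
      rw [hc, PySem.List.pyGetD_natCast]
    have e2 : PySem.List.pyGetD A ((k : Int) + (d : Int) - (k : Int)) 0 = A.getD d 0 := by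
      have hc : (k : Int) + (d : Int) - (k : Int) = ((d : Nat) : Int) := by ring
      rw [hc, PySem.List.pyGetD_natCast]
    have hw : pvWin A k d + A.getD (d + k) 0 - A.getD d 0 = pvWin A k (d + 1) :=
      (pv_win_succ A k d (by omega)).symm
    simp only [e1, e2, hw, List.range_succ, List.map_append, List.map_cons, List.map_nil]

theorem pv_B_closed (A : List Int) (k : Nat) (hk : k ≤ A.length) :
    kSubarraySum1_alt A (k : Int) = (List.range (A.length - k + 1)).map (pvWin A k) := by
  unfold kSubarraySum1_alt
  have hng : ¬ ((k : Int) > (A.length : Int)) := by omega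
  rw [if_neg hng]
  have htot : (PySem.List.slice A none (some (k : Int))).foldl (· + ·) 0 = pvWin A k 0 := by
    rw [PySem.List.slice_to_natCast, pv_foldl_add]
    simp [pvWin]
  rw [htot]
  have hcast : (A.length : Int) = (k : Int) + ((A.length - k : Nat) : Int) := by omega
  simp only [hcast, pv_B_loop A k (A.length - k) (by omega)]

-- ===== VERDICT (by name: the statement is the Claim_ definition above) =====
theorem kSubarraySum1_spec : Claim_equal_kSubarraySum1 := by
  intro A k _ hpre
  unfold Spec_kSubarraySum1
  unfold Pre_kSubarraySum1 at hpre
  have hk : k = (k.toNat : Int) := by omega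
  by_cases hle : k.toNat ≤ A.length
  · rw [hk, pv_A_closed A k.toNat hle, pv_B_closed A k.toNat hle]
  · -- k > n: A's outer range is empty and B takes the early-return branch
    have hnil : PySem.List.pyRange 0 ((A.length : Int) - ((k.toNat : Nat) : Int) + 1) 1 = [] :=
      PySem.List.pyRange_one_eq_nil (by omega)
    have hgt : ((A.length : Int)) < ((k.toNat : Nat) : Int) := by omega
    rw [hk]
    simp only [kSubarraySum1, kSubarraySum1_alt, hnil, List.foldl_nil]
    rw [if_pos hgt]
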